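-- pv_equiv track=rewrite | github.com/bonilab/PSU-CIDD-MaSim-Support | Python/include/calibrationLib.py | get_bin
-- ===== SOURCE A (Python) =====
-- def get_bin(value, bins):
--     '''Get the bin that the value belongs to'''
--
--     # If the value is a bin, then return it
--     if value in bins: return value
--
--     # Sort the bins and step through them
--     bins = sorted(bins)
--     for item in bins:
--         if value < item:
--             return item
--
--     # For values greater than the largest bin, return that one
--     if item >= max(bins):
--         return max(bins)
--
--     # Throw an error if we couldn't find a match (shouldn't happen)
--     raise Exception("Matching bin not found for value: " + str(value))
-- ===== SOURCE B (Python) =====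
-- import bisect
--
-- def get_bin(value, bins):
--     '''Get the bin that the value belongs to'''
--     if value in bins:
--         return value
--     s = sorted(bins)
--     i = bisect.bisect_right(s, value)
--     if i < len(s):
--         return s[i]
--     return s[-1]
-- ===== Notes on version B (the rewrite author's own statement) =====
-- stated objective: idiomatic
-- what changed: Replaces A's linear scan of the sorted bins (and its trailing max() recomputation) with bisect.bisect_right binary search for the insertion point, returning s[i] or s[-1].
import Mathlib
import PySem

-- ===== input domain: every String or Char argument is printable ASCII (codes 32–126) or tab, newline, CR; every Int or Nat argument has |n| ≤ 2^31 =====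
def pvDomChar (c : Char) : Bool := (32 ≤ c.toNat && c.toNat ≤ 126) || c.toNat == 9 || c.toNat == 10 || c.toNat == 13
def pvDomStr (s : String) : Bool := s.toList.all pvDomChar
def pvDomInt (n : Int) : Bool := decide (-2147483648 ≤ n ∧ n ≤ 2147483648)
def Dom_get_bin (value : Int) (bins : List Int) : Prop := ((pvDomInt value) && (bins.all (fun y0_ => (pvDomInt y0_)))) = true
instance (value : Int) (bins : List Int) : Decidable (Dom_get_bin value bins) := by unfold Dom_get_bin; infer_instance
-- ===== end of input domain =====

-- B replaces A's linear scan of the sorted bins with bisect.bisect_right (idiomatic stdlib binary search); same return value.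

-- ===== PORT A =====
def get_bin (value : Int) (bins : List Int) : Int :=
  if bins.contains value then value
  else
    let s := PySem.List.sorted bins (fun x => x)
    match s.find? (fun item => decide (value < item)) with   -- for item in bins: if value < item: return item
    | some item => item
    | none =>
      match s.getLast? with                                  -- `item` = last loop variable; none = UnboundLocalError (empty bins, excluded by Pre_)
      | none => 0
      | some item =>
        match PySem.List.max? s (fun x => x) with
        | none => 0                                          -- max([]) unreachable here
        | some m => if item ≥ m then m else 0                -- else-branch = Python's raise (unreachable for nonempty bins)

-- ===== PORT B =====
def get_bin_alt (value : Int) (bins : List Int) : Int :=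
  if bins.contains value then value
  else
    let s := PySem.List.sorted bins (fun x => x)
    let i := PySem.List.bisectRight s value
    if (i : Int) < s.length then PySem.List.pyGetD s (i : Int) 0   -- s[i]
    else PySem.List.pyGetD s (-1) 0                                -- s[-1]

-- ===== PRECONDITION & SPEC =====
-- Pre_ excludes empty bins, on which A raises UnboundLocalError (and B raises IndexError).
def Pre_get_bin (value : Int) (bins : List Int) : Prop := bins ≠ []
instance (value : Int) (bins : List Int) : Decidable (Pre_get_bin value bins) := by unfold Pre_get_bin; infer_instance
def pvWitness_get_bin : Int × List Int := (3, [1, 5, 10])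

def Spec_get_bin (value : Int) (bins : List Int) (out : Int) : Prop := out = get_bin_alt value bins
instance (value : Int) (bins : List Int) (out : Int) : Decidable (Spec_get_bin value bins out) := by unfold Spec_get_bin; infer_instance

-- ===== CLAIM (what is proved, stated in full; the proofs are below) =====
def Claim_equal_get_bin : Prop := ∀ (value : Int) (bins : List Int), Dom_get_bin value bins → Pre_get_bin value bins → Spec_get_bin value bins (get_bin value bins)

-- ===== LEMMAS AND PROOFS =====

-- find? returns the element at the first index satisfying p
theorem find?_eq_some_at {p : Int → Bool} : ∀ (s : List Int) (i : Nat) (hi : i < s.length),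
    (∀ j (hj : j < s.length), j < i → p s[j] = false) → p s[i] = true →
    s.find? p = some s[i] := by
  intro s
  induction s with
  | nil => intro i hi _ _; simp at hi
  | cons a t ih =>
    intro i hi hbef hp
    cases i with
    | zero =>
      simp only [List.getElem_cons_zero] at hp
      simp [List.find?, hp]
    | succ k =>
      have ha : p a = false := by
        have := hbef 0 (by simp) (by omega)
        simpa using this
      simp only [List.find?, ha, List.getElem_cons_succ]
      exact ih k (by simpa using hi)
        (fun j hj hlt => by simpa using hbef (j+1) (by simpa using hj) (by omega))
        (by simpa using hp)

-- ===== VERDICT (by name: the statement is the Claim_ definition above) =====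
theorem get_bin_spec : Claim_equal_get_bin := by
  intro value bins _ hpre
  unfold Spec_get_bin
  simp only [get_bin, get_bin_alt]
  by_cases hc : bins.contains value
  · rw [if_pos hc, if_pos hc]
  · rw [if_neg hc, if_neg hc]
    set s := PySem.List.sorted bins (fun x => x) with hs
    have hsne : s ≠ [] := by
      intro h; exact hpre ((PySem.List.sorted_eq_nil_iff _ _ _).mp h)
    have hlen0 : 0 < s.length := List.length_pos_iff.mpr hsne
    have hpw : s.Pairwise (fun a b => a ≤ b) := by
      rw [hs]; exact PySem.List.sorted_pairwise bins (fun x => x)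
    obtain ⟨hle, hbefore, hafter⟩ := by
      have := PySem.List.bisectRight_spec s value hpw
      exact this
    set i := PySem.List.bisectRight s value with hi
    by_cases hlt : i < s.length
    · -- first element greater than value exists, at index i
      have hfind : s.find? (fun item => decide (value < item)) = some s[i] :=
        find?_eq_some_at s i hlt
          (fun j hj hji => by simpa using not_lt.mpr (hbefore j hj hji))
          (by simpa using hafter i hlt le_rfl)
      rw [hfind, if_pos (by exact_mod_cast hlt)]
      rw [PySem.List.pyGetD_eq_getElem s 0 (Int.natCast_nonneg i) (by exact_mod_cast hlt)]
      simp
    · -- every element ≤ value: the scan falls through, both return the last (= max) element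
      have hil : i = s.length := by omega
      have hall : ∀ x ∈ s, x ≤ value := by
        intro x hx
        obtain ⟨j, hj, rfl⟩ := List.mem_iff_getElem.mp hx
        exact hbefore j hj (by omega)
      have hfind : s.find? (fun item => decide (value < item)) = none := by
        apply List.find?_eq_none.mpr
        intro x hx; simpa using not_lt.mpr (hall x hx)
      rw [hfind, if_neg (by exact_mod_cast hlt)]
      rw [List.getLast?_eq_some_getLast hsne]
      obtain ⟨m, hm⟩ : ∃ m, PySem.List.max? s (fun x => x) = some m :=
        Option.ne_none_iff_exists'.mp
          (fun h => hsne ((PySem.List.max?_eq_none_iff s (fun x : Int => x)).mp h))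
      rw [hm]
      have hmmax : ∀ y ∈ s, y ≤ m := by
        intro y hy; simpa using PySem.List.max?_isMax hm y hy
      have hmem : m ∈ s := PySem.List.max?_mem hm
      have hml : m ≤ s.getLast hsne := by
        obtain ⟨j, hj, rfl⟩ := List.mem_iff_getElem.mp hmem
        rw [List.getLast_eq_getElem hsne]
        have h2 : (PySem.List.sorted bins (fun x => x))[j]'(by rw [← hs]; exact hj)
            ≤ (PySem.List.sorted bins (fun x => x))[s.length - 1]'(by rw [← hs]; omega) :=
          PySem.List.sorted_id_getElem_mono (xs := bins) (by omega) (by rw [← hs]; omega)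
        simpa [← hs] using h2
      have hlm : s.getLast hsne ≤ m := hmmax _ (List.getLast_mem hsne)
      show (if s.getLast hsne ≥ m then m else 0) = PySem.List.pyGetD s (-1) 0
      rw [if_pos hml]
      rw [PySem.List.pyGetD_neg_one s 0 hsne]
      exact le_antisymm hml hlm
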